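-- pv_equiv track=rewrite | github.com/davidxiao93/Advent-of-Code | 2017/21a.py | grid_to_tuples
-- ===== SOURCE A (Python) =====
-- from typing import List
--
-- def grid_to_tuples(grid: List[str]):
--     tuple_sides = 3
--     if len(grid) % 2 == 0:
--         tuple_sides = 2
--     tuples = []
--     for ty in range(int(len(grid) / tuple_sides)):
--         ts = [()] * int(len(grid) / tuple_sides)
--         for y, r in enumerate(grid[ty * tuple_sides: ty * tuple_sides + tuple_sides]):
--             for i in range(0, len(r), tuple_sides):
--                 ts[(int(i/tuple_sides))] = ts[(int(i/tuple_sides))] + tuple(r[i: i + tuple_sides])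
--         tuples += ts
--     return tuples
-- ===== SOURCE B (Python) =====
-- def grid_to_tuples(grid):
--     side = 2 if len(grid) % 2 == 0 else 3
--     n = len(grid) // side
--     return [tuple(ch for dy in range(side)
--                   for ch in grid[ty * side + dy][tx * side: tx * side + side])
--             for ty in range(n) for tx in range(n)]
-- ===== Notes on version B (the rewrite author's own statement) =====
-- stated objective: simpler
-- what changed: B builds each tile directly as one comprehension concatenating the per-row slices grid[ty*side+dy][tx*side:tx*side+side], eliminating A's mutable accumulator array ts and its per-character tuple concatenation across tile columns.
import Mathlib
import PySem

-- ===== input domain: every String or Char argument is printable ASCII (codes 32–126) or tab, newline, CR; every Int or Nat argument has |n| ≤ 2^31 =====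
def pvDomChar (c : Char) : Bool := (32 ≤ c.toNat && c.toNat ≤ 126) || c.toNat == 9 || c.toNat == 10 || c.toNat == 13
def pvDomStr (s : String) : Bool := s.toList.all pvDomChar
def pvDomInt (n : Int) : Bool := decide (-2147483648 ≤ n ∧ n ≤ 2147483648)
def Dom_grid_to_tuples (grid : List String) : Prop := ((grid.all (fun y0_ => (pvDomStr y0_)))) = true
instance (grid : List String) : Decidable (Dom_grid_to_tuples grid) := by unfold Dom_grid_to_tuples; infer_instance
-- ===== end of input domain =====

-- B replaces A's mutable tile-accumulator array by directly building each tile from row slices (simpler decomposition, same cost).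


-- tuple(<str>) in Python yields a tuple of 1-character strings
def pyChars (s : String) : List String := s.toList.map (fun c => String.ofList [c])

-- ===== PORT A =====
def grid_to_tuples (grid : List String) : List (List String) :=
  let side : Nat := if grid.length % 2 = 0 then 2 else 3
  let n : Nat := grid.length / side
  (List.range n).foldl (fun tuples ty =>
    let ts0 : List (List String) := List.replicate n []
    let ts := (PySem.List.slice grid (some ((ty * side : Nat) : Int)) (some ((ty * side + side : Nat) : Int))).foldl
      (fun ts r =>
        (PySem.List.pyRange 0 (PySem.Str.len r) (side : Int)).foldl
          (fun ts i =>
            -- ts[int(i/side)] = ts[int(i/side)] + tuple(r[i:i+side]); i ≥ 0 always, so int(i/side) = i // side;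
            -- the out-of-range IndexError case is excluded by Pre_
            ts.set ((PySem.Int.floordiv i (side : Int)).toNat)
              (ts.getD ((PySem.Int.floordiv i (side : Int)).toNat) [] ++
                pyChars (PySem.Str.slice r (some i) (some (i + (side : Int)))))) ts) ts0
    tuples ++ ts) []

-- ===== PORT B =====
def grid_to_tuples_alt (grid : List String) : List (List String) :=
  let side : Nat := if grid.length % 2 = 0 then 2 else 3
  let n : Nat := grid.length / side
  (List.range n).flatMap (fun ty =>
    (List.range n).map (fun tx =>
      (List.range side).flatMap (fun dy =>
        -- grid[ty*side+dy]: the index is always < n*side ≤ len(grid), so getD's default is never used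
        pyChars (PySem.Str.slice (grid.getD (ty * side + dy) "")
          (some ((tx * side : Nat) : Int)) (some ((tx * side + side : Nat) : Int))))))

-- ===== PRECONDITION & SPEC =====
-- Pre_ excludes exactly the inputs on which A raises IndexError: a row among the first
-- n*side rows longer than n*side characters makes A index ts out of range.
def Pre_grid_to_tuples (grid : List String) : Prop :=
  ∀ r ∈ grid.take ((grid.length / (if grid.length % 2 = 0 then 2 else 3)) * (if grid.length % 2 = 0 then 2 else 3)),
    r.length ≤ (grid.length / (if grid.length % 2 = 0 then 2 else 3)) * (if grid.length % 2 = 0 then 2 else 3)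
instance (grid : List String) : Decidable (Pre_grid_to_tuples grid) := by unfold Pre_grid_to_tuples; infer_instance
def pvWitness_grid_to_tuples : List String := ["ab", "cd"]

def Spec_grid_to_tuples (grid : List String) (out : List (List String)) : Prop := out = grid_to_tuples_alt grid
instance (grid : List String) (out : List (List String)) : Decidable (Spec_grid_to_tuples grid out) := by unfold Spec_grid_to_tuples; infer_instance

-- ===== CLAIM (what is proved, stated in full; the proofs are below) =====
def Claim_equal_grid_to_tuples : Prop := ∀ (grid : List String), Dom_grid_to_tuples grid → Pre_grid_to_tuples grid → Spec_grid_to_tuples grid (grid_to_tuples grid)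

-- ===== LEMMAS AND PROOFS =====

-- the tile-column tx contribution of one row r: the characters of r[tx*side : tx*side+side]
def chunkS (side : Nat) (r : List Char) (tx : Nat) : List String :=
  ((r.drop (tx * side)).take side).map (fun c => String.ofList [c])

theorem pyChars_slice (r : String) (a b : Int) (j s : Nat) (ha : a = (j : Int)) (hb : b = a + (s : Int)) :
    pyChars (PySem.Str.slice r (some a) (some b)) = ((r.toList.drop j).take s).map (fun c => String.ofList [c]) := by
  subst hb ha
  unfold pyChars
  rw [PySem.Str.toList_slice, PySem.Chars.slice_eq_listSlice, PySem.List.slice_natCast_add]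

theorem setfold_length (c : Nat → List String) :
    ∀ (m : Nat) (ts : List (List String)),
      ((List.range m).foldl (fun ts k => ts.set k (ts.getD k [] ++ c k)) ts).length = ts.length := by
  intro m
  induction m with
  | zero => intro ts; simp
  | succ m ih =>
    intro ts
    rw [List.range_succ, List.foldl_append]
    simp only [List.foldl_cons, List.foldl_nil, List.length_set]
    exact ih ts

theorem setfold_getElem? (c : Nat → List String) :
    ∀ (m : Nat) (ts : List (List String)) (tx : Nat),
      ((List.range m).foldl (fun ts k => ts.set k (ts.getD k [] ++ c k)) ts)[tx]? =
        if tx < m then ts[tx]?.map (· ++ c tx) else ts[tx]? := by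
  intro m
  induction m with
  | zero => intro ts tx; simp
  | succ m ih =>
    intro ts tx
    rw [List.range_succ, List.foldl_append]
    simp only [List.foldl_cons, List.foldl_nil]
    rw [List.getElem?_set]
    have hlen := setfold_length c m ts
    by_cases h : m = tx
    · subst h
      by_cases hm : m < ts.length
      · rw [if_pos rfl, if_pos (by omega), if_pos (Nat.lt_succ_self m)]
        rw [List.getD_eq_getElem?_getD, ih, if_neg (lt_irrefl m)]
        rw [List.getElem?_eq_getElem hm]
        rfl
      · rw [if_pos rfl, if_neg (by omega), if_pos (Nat.lt_succ_self m)]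
        rw [List.getElem?_eq_none (by omega)]
        rfl
    · rw [if_neg h, ih]
      by_cases h2 : tx < m
      · rw [if_pos h2, if_pos (by omega)]
      · rw [if_neg h2, if_neg (by omega)]

theorem setfold_map_range (n m : Nat) (c : Nat → List String) (f : Nat → List String)
    (hm : m ≤ n) (hc : ∀ tx, m ≤ tx → c tx = []) :
    (List.range m).foldl (fun ts k => ts.set k (ts.getD k [] ++ c k)) ((List.range n).map f)
      = (List.range n).map (fun tx => f tx ++ c tx) := by
  apply List.ext_getElem?
  intro tx
  rw [setfold_getElem? c m _ tx]
  by_cases h : tx < n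
  · rw [List.getElem?_map, List.getElem?_map, List.getElem?_range h]
    by_cases h2 : tx < m
    · simp [h2]
    · simp only [if_neg h2, Option.map_some]
      rw [hc tx (by omega), List.append_nil]
  · have h1 : (List.range n)[tx]? = none := by
      rw [List.getElem?_eq_none]; simpa using (by omega : n ≤ tx)
    rw [List.getElem?_map, List.getElem?_map, h1]
    simp [show ¬ tx < m by omega]

-- processing ONE row of A's inner index loop appends each tile-column chunk at its index
theorem row_fold_one (side n : Nat) (hs : 0 < side) (f : Nat → List String) (r : String)
    (hr : r.toList.length ≤ n * side) :
    (PySem.List.pyRange 0 (PySem.Str.len r) (side : Int)).foldl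
      (fun ts i =>
        ts.set ((PySem.Int.floordiv i (side : Int)).toNat)
          (ts.getD ((PySem.Int.floordiv i (side : Int)).toNat) [] ++
            pyChars (PySem.Str.slice r (some i) (some (i + (side : Int))))))
      ((List.range n).map f)
    = (List.range n).map (fun tx => f tx ++ chunkS side r.toList tx) := by
  have hsZ : (0 : Int) < (side : Int) := by exact_mod_cast hs
  rw [PySem.Str.len_eq, PySem.List.pyRange_of_pos _ _ hsZ]
  set Ln := r.toList.length with hLn
  set m := (Ln + side - 1) / side with hm
  have hif : (if (0 : Int) < (Ln : Int) then (((Ln : Int) - 0 + side - 1) / side).toNat else 0) = m := by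
    by_cases h : 0 < Ln
    · rw [if_pos (by exact_mod_cast h)]
      have h1 : ((Ln : Int) - 0 + side - 1) = ((Ln + side - 1 : Nat) : Int) := by omega
      rw [h1, ← Int.natCast_div, Int.toNat_natCast]
    · rw [if_neg (by omega)]
      have h0 : Ln = 0 := by omega
      rw [hm, h0, Nat.div_eq_of_lt (by omega)]
  rw [hif, List.foldl_map]
  have hfun : (fun (ts : List (List String)) (k : Nat) =>
      ts.set ((PySem.Int.floordiv ((0 : Int) + (side : Int) * (k : Int)) (side : Int)).toNat)
        (ts.getD ((PySem.Int.floordiv ((0 : Int) + (side : Int) * (k : Int)) (side : Int)).toNat) [] ++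
          pyChars (PySem.Str.slice r (some ((0 : Int) + (side : Int) * (k : Int)))
            (some ((0 : Int) + (side : Int) * (k : Int) + (side : Int))))))
      = fun ts k => ts.set k (ts.getD k [] ++ chunkS side r.toList k) := by
    funext ts k
    have hidx : (PySem.Int.floordiv ((0 : Int) + (side : Int) * (k : Int)) (side : Int)).toNat = k := by
      simp only [PySem.Int.floordiv, zero_add]
      rw [Int.mul_fdiv_cancel_left _ (by exact_mod_cast hs.ne')]
      exact Int.toNat_natCast k
    have hsl := pyChars_slice r ((0 : Int) + (side : Int) * (k : Int))
      ((0 : Int) + (side : Int) * (k : Int) + (side : Int)) (k * side) side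
      (by push_cast; ring) rfl
    rw [hidx, hsl]
    rfl
  rw [hfun]
  have h1 : m * side ≤ Ln + side - 1 := Nat.div_mul_le_self _ _
  have hmn : m ≤ n := by
    have h2 : Ln + side - 1 < (n + 1) * side := by
      rw [Nat.succ_mul]
      have := hr
      revert this
      generalize n * side = K
      intro h3
      omega
    have := lt_of_mul_lt_mul_right (lt_of_le_of_lt h1 h2) (Nat.zero_le side)
    omega
  have hLm : Ln ≤ m * side := by
    by_contra hcon
    rw [Nat.not_le] at hcon
    have h3 : (m + 1) * side ≤ Ln + side - 1 := by
      rw [Nat.succ_mul]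
      revert hcon
      generalize m * side = K
      intro h4
      omega
    have h4 : m + 1 ≤ (Ln + side - 1) / side := (Nat.le_div_iff_mul_le hs).2 h3
    omega
  exact setfold_map_range n m _ f hmn (fun tx htx => by
    have h5 : Ln ≤ tx * side := le_trans hLm (Nat.mul_le_mul_right side htx)
    simp [chunkS, List.drop_eq_nil_of_le (by omega : r.toList.length ≤ tx * side)])

-- A's per-tile-row pass: streaming the rows appends each row's chunks pointwise
theorem rows_fold (side n : Nat) (hs : 0 < side) :
    ∀ (rows : List String) (f : Nat → List String),
      (∀ r ∈ rows, r.toList.length ≤ n * side) →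
      rows.foldl
        (fun ts r =>
          (PySem.List.pyRange 0 (PySem.Str.len r) (side : Int)).foldl
            (fun ts i =>
              ts.set ((PySem.Int.floordiv i (side : Int)).toNat)
                (ts.getD ((PySem.Int.floordiv i (side : Int)).toNat) [] ++
                  pyChars (PySem.Str.slice r (some i) (some (i + (side : Int)))))) ts)
        ((List.range n).map f)
      = (List.range n).map (fun tx => f tx ++ rows.flatMap (fun r => chunkS side r.toList tx)) := by
  intro rows
  induction rows with
  | nil => intro f _; simp
  | cons r rows ih =>
    intro f h
    simp only [List.foldl_cons]
    rw [row_fold_one side n hs f r (h r (by simp))]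
    rw [ih (fun tx => f tx ++ chunkS side r.toList tx) (fun r' hr' => h r' (by simp [hr']))]
    simp [List.flatMap_cons, List.append_assoc]

theorem take_drop_getD (xs : List String) (j s : Nat) (h : j + s ≤ xs.length) :
    (xs.drop j).take s = (List.range s).map (fun dy => xs.getD (j + dy) "") := by
  apply List.ext_getElem
  · simp only [List.length_take, List.length_drop, List.length_map, List.length_range]
    omega
  · intro i h1 h2
    have hi : i < s := by simpa using h2
    have hjx : j + i < xs.length := by omega
    rw [List.getElem_take, List.getElem_drop]
    rw [List.getElem_map, List.getElem_range]
    rw [List.getD_eq_getElem?_getD, List.getElem?_eq_getElem hjx]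
    rfl

theorem mem_take_of_mem_window {xs : List String} {r : String} {j s K : Nat}
    (h : r ∈ (xs.drop j).take s) (hK : j + s ≤ K) : r ∈ xs.take K := by
  have h1 : r ∈ (xs.take (j + s)).drop j := by
    rw [List.drop_take]
    simpa [Nat.add_sub_cancel_left] using h
  have h2 : r ∈ xs.take (j + s) := List.mem_of_mem_drop h1
  rw [show xs.take (j + s) = (xs.take K).take (j + s) by rw [List.take_take, min_eq_left hK]] at h2
  exact List.mem_of_mem_take h2

theorem main_aux (grid : List String) (side : Nat) (hs : 0 < side)
    (pre : ∀ r ∈ grid.take (grid.length / side * side), r.length ≤ grid.length / side * side) :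
    (List.range (grid.length / side)).foldl
      (fun tuples ty =>
        tuples ++
          (PySem.List.slice grid (some ((ty * side : Nat) : Int)) (some ((ty * side + side : Nat) : Int))).foldl
            (fun ts r =>
              (PySem.List.pyRange 0 (PySem.Str.len r) (side : Int)).foldl
                (fun ts i =>
                  ts.set ((PySem.Int.floordiv i (side : Int)).toNat)
                    (ts.getD ((PySem.Int.floordiv i (side : Int)).toNat) [] ++
                      pyChars (PySem.Str.slice r (some i) (some (i + (side : Int))))))
                ts)
            (List.replicate (grid.length / side) [])) []
    = (List.range (grid.length / side)).flatMap (fun ty =>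
        (List.range (grid.length / side)).map (fun tx =>
          (List.range side).flatMap (fun dy =>
            pyChars (PySem.Str.slice (grid.getD (ty * side + dy) "")
              (some ((tx * side : Nat) : Int)) (some ((tx * side + side : Nat) : Int)))))) := by
  set n := grid.length / side with hn
  have hlen : n * side ≤ grid.length := Nat.div_mul_le_self _ _
  rw [PySem.List.foldl_append_eq_flatMap, List.nil_append]
  rw [List.flatMap_def, List.flatMap_def]
  refine congrArg List.flatten (List.map_congr_left ?_)
  intro ty hty
  have hty' : ty < n := List.mem_range.mp hty
  have hwin : ty * side + side ≤ n * side := by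
    have h1 : (ty + 1) * side ≤ n * side := Nat.mul_le_mul_right side (by omega)
    rw [Nat.succ_mul] at h1
    exact h1
  have hcast : ((ty * side + side : Nat) : Int) = ((ty * side : Nat) : Int) + (side : Int) := by push_cast; ring
  rw [hcast, PySem.List.slice_natCast_add]
  have hrep : (List.replicate n ([] : List String)) = (List.range n).map (fun _ => []) := by
    rw [List.map_const', List.length_range]
  rw [hrep]
  have hmem : ∀ r ∈ (grid.drop (ty * side)).take side, r.toList.length ≤ n * side := by
    intro r hr
    have := pre r (mem_take_of_mem_window hr hwin)
    rw [String.length_toList]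
    exact this
  rw [rows_fold side n hs ((grid.drop (ty * side)).take side) (fun _ => []) hmem]
  refine List.map_congr_left ?_
  intro tx _
  rw [List.nil_append]
  rw [take_drop_getD grid (ty * side) side (le_trans hwin hlen), List.flatMap_map]
  congr 1
  funext dy
  exact (pyChars_slice (grid.getD (ty * side + dy) "") _ _ (tx * side) side
    rfl (by push_cast; ring)).symm

-- ===== VERDICT (by name: the statement is the Claim_ definition above) =====
theorem grid_to_tuples_spec : Claim_equal_grid_to_tuples := by
  intro grid _ pre
  unfold Pre_grid_to_tuples at pre
  unfold Spec_grid_to_tuples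
  simp only [grid_to_tuples, grid_to_tuples_alt]
  by_cases hpar : grid.length % 2 = 0
  · simp only [if_pos hpar] at pre ⊢
    exact main_aux grid 2 (by omega) pre
  · simp only [if_neg hpar] at pre ⊢
    exact main_aux grid 3 (by omega) pre
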